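-- pv_equiv track=rewrite | github.com/abhishec/purple-agent-business-process-worker | src/hitl_guard.py | classify_tool
-- ===== SOURCE A (Python) =====
-- _MUTATE_PREFIXES = (
--     "create_", "update_", "delete_", "cancel_", "approve_", "reject_",
--     "submit_", "send_", "post_", "modify_", "change_", "set_", "add_",
--     "remove_", "revoke_", "grant_", "book_", "order_", "place_",
--     "transfer_", "pay_", "charge_", "refund_", "issue_", "close_",
--     "archive_", "migrate_", "deploy_", "rollback_", "terminate_",
--     "execute_", "apply_", "process_", "dispatch_", "trigger_",
--     "write_", "insert_", "upsert_", "patch_", "commit_", "push_",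
--     "publish_", "fire_", "mark_", "flag_", "lock_", "unlock_",
--     # Extended: verbs that are clearly state-modifying but were missing
--     "escalate_", "initiate_", "finalize_", "complete_", "activate_",
--     "deactivate_", "enable_", "disable_", "start_", "stop_", "pause_",
--     "resume_", "confirm_", "acknowledge_", "resolve_", "reopen_",
--     "merge_", "split_", "transfer_", "move_", "assign_", "unassign_",
--     "notify_", "alert_", "enroll_", "disenroll_", "provision_", "deprovision_",
--     "bump_", "promote_", "demote_", "reset_", "regenerate_", "rotate_",
--     "register_", "deregister_", "tag_", "untag_", "link_", "unlink_",
--     "import_", "export_", "upload_", "download_",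
-- )
--
-- _READ_PREFIXES = (
--     "get_", "list_", "fetch_", "read_", "search_", "find_", "query_",
--     "check_", "verify_", "lookup_", "describe_", "show_", "calculate_",
--     "compute_", "estimate_", "preview_", "validate_", "inspect_",
--     "count_", "sum_", "aggregate_", "filter_", "compare_",
-- )
--
-- _MUTATE_KEYWORDS = (
--     "write", "insert", "upsert", "patch", "execute", "commit",
--     "push", "publish", "trigger", "invoke", "dispatch",
--     # Extended keywords for verbs embedded in the middle of tool names
--     "escalat", "initiat", "finaliz", "terminat", "activat", "deactivat",
-- )
--
-- def classify_tool(tool_name: str) -> str: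
--     """
--     Returns 'read', 'compute', or 'mutate'.
--     read   = safe to call any time (data gathering)
--     compute = calculation only, no side effects
--     mutate = changes state — BLOCKED at APPROVAL_GATE
--
--     Fix (CRITICAL): The original default was 'return "read"' for any tool
--     that matched no prefix. This meant novel mutation tools (e.g. escalate_ticket,
--     initiate_payment, finalize_order) were silently classified as READ and allowed
--     through the APPROVAL_GATE, causing unauthorized mutations.
--
--     Fix: Default is now 'mutate' for unrecognized tools. The reasoning:
--     - A read tool that gets misclassified as mutate = harmless (it just appears
--       in the blocked list, no actual mutation occurs since it's read-only)
--     - A mutate tool that gets misclassified as read = dangerous (unauthorized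
--       state change happens without human approval)
--     - Erring toward mutation blocking is the correct security posture.
--
--     Compute tools (calculate_, compute_, estimate_) are still identified first
--     since they are truly side-effect-free and should never be blocked.
--     """
--     name = tool_name.lower()
--     # Check compute FIRST (higher priority than general read prefixes)
--     if name.startswith("calculate_") or name.startswith("compute_") or name.startswith("estimate_"):
--         return "compute"
--     if any(name.startswith(p) for p in _READ_PREFIXES):
--         return "read"
--     if any(name.startswith(p) for p in _MUTATE_PREFIXES):
--         return "mutate"
--     if any(kw in name for kw in _MUTATE_KEYWORDS):
--         return "mutate"
--     # Default: mutate — unknown tools are assumed to be state-modifying.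
--     # A false positive here (read tool blocked) is recoverable; a false negative
--     # (mutate tool allowed through) causes unauthorized mutations at APPROVAL_GATE.
--     return "mutate"
-- ===== SOURCE B (Python) =====
-- # Table-driven reclassification: one dict lookup on the name's first token
-- # (everything up to and including the first '_') replaces the repeated
-- # startswith scans.  All non-read/compute outcomes of A are 'mutate', so no
-- # mutate tables are needed at all.
-- _CATEGORY = {
--     "calculate_": "compute", "compute_": "compute", "estimate_": "compute",
--     "get_": "read", "list_": "read", "fetch_": "read", "read_": "read",
--     "search_": "read", "find_": "read", "query_": "read", "check_": "read",
--     "verify_": "read", "lookup_": "read", "describe_": "read", "show_": "read",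
--     "preview_": "read", "validate_": "read", "inspect_": "read",
--     "count_": "read", "sum_": "read", "aggregate_": "read", "filter_": "read",
--     "compare_": "read",
-- }
--
-- def classify_tool(tool_name: str) -> str:
--     name = tool_name.lower()
--     i = name.find("_")
--     if i == -1:
--         return "mutate"
--     return _CATEGORY.get(name[: i + 1], "mutate")
-- ===== Notes on version B (the rewrite author's own statement) =====
-- stated objective: simpler
-- what changed: Replaces the three sequential startswith scans over prefix tuples (plus a substring-keyword scan) by a single dict lookup keyed on the name's first underscore-terminated token; the mutation tables disappear entirely because every path of A that is not read/compute ends in the same default category.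
import Mathlib
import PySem

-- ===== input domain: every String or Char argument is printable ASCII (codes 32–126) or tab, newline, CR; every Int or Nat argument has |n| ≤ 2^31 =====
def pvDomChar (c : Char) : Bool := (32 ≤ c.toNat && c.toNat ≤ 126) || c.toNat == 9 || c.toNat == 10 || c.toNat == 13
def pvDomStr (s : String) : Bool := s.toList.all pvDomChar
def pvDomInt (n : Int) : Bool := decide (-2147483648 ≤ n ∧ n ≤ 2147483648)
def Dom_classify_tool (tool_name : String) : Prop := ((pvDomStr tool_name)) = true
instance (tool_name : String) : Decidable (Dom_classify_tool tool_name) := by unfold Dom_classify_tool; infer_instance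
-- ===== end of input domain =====

-- B replaces A's repeated startswith scans (and its never-decisive mutate tables) by one
-- dict lookup keyed on the name's first underscore-terminated token; objective: simpler.


-- ===== PORT A =====  (literal transliteration of classify_tool from src/hitl_guard.py)
def pvMutatePrefixes : List String := ["create_", "update_", "delete_", "cancel_", "approve_", "reject_", "submit_", "send_", "post_", "modify_", "change_", "set_", "add_", "remove_", "revoke_", "grant_", "book_", "order_", "place_", "transfer_", "pay_", "charge_", "refund_", "issue_", "close_", "archive_", "migrate_", "deploy_", "rollback_", "terminate_", "execute_", "apply_", "process_", "dispatch_", "trigger_", "write_", "insert_", "upsert_", "patch_", "commit_", "push_", "publish_", "fire_", "mark_", "flag_", "lock_", "unlock_", "escalate_", "initiate_", "finalize_", "complete_", "activate_", "deactivate_", "enable_", "disable_", "start_", "stop_", "pause_", "resume_", "confirm_", "acknowledge_", "resolve_", "reopen_", "merge_", "split_", "transfer_", "move_", "assign_", "unassign_", "notify_", "alert_", "enroll_", "disenroll_", "provision_", "deprovision_", "bump_", "promote_", "demote_", "reset_", "regenerate_", "rotate_", "register_", "deregister_", "tag_", "untag_", "link_", "unlink_", "import_", "export_", "upload_", "dow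nload_"]
def pvReadPrefixes : List String := ["get_", "list_", "fetch_", "read_", "search_", "find_", "query_", "check_", "verify_", "lookup_", "describe_", "show_", "calculate_", "compute_", "estimate_", "preview_", "validate_", "inspect_", "count_", "sum_", "aggregate_", "filter_", "compare_"]
def pvMutateKeywords : List String := ["write", "insert", "upsert", "patch", "execute", "commit", "push", "publish", "trigger", "invoke", "dispatch", "escalat", "initiat", "finaliz", "terminat", "activat", "deactivat"]

def classify_tool (tool_name : String) : String :=
  let name := PySem.Str.lower tool_name
  if PySem.Str.startswith name "calculate_" || PySem.Str.startswith name "compute_" || PySem.Str.startswith name "estimate_" then "compute"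
  else if pvReadPrefixes.any (fun p => PySem.Str.startswith name p) then "read"
  else if pvMutatePrefixes.any (fun p => PySem.Str.startswith name p) then "mutate"
  else if pvMutateKeywords.any (fun kw => PySem.Str.isIn kw name) then "mutate"
  else "mutate"

-- ===== PORT B =====  (port of Source B: one dict lookup on the first underscore-terminated token)
def pvPrefixCategory : PySem.Dict String String := PySem.Dict.ofList
  [("calculate_", "compute"), ("compute_", "compute"), ("estimate_", "compute"), ("get_", "read"), ("list_", "read"), ("fetch_", "read"), ("read_", "read"), ("search_", "read"), ("find_", "read"), ("query_", "read"), ("check_", "read"), ("verify_", "read"), ("lookup_", "read"), ("describe_", "read"), ("show_", "read"), ("preview_", "read"), ("validate_", "read"), ("inspect_", "read"), ("count_", "read"), ("sum_", "read"), ("aggregate_", "read"), ("filter_", "read"), ("compare_", "read")]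

def classify_tool_alt (tool_name : String) : String :=
  let name := PySem.Str.lower tool_name
  let i := PySem.Str.find name "_"
  if i = -1 then "mutate"
  else PySem.Dict.getD pvPrefixCategory (PySem.Str.slice name none (some (i + 1))) "mutate"

-- ===== PRECONDITION & SPEC =====  (A is total: no Pre_)
def Spec_classify_tool (tool_name : String) (out : String) : Prop := out = classify_tool_alt tool_name
instance (tool_name : String) (out : String) : Decidable (Spec_classify_tool tool_name out) := by unfold Spec_classify_tool; infer_instance

-- ===== CLAIM (what is proved, stated in full; the proofs are below) =====
def Claim_equal_classify_tool : Prop := ∀ (tool_name : String), Dom_classify_tool tool_name → Spec_classify_tool tool_name (classify_tool tool_name)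

-- ===== LEMMAS AND PROOFS =====
-- A prefix of the shape w ++ "_" (no '_' in w) starts a string iff it equals the string's
-- first underscore-terminated token (n = index of the first '_').
lemma pv_prefix_key_iff (cs w : List Char) (n : Nat)
    (hn : cs[n]? = some '_') (hmin : ∀ i < n, cs[i]? ≠ some '_') (hw : '_' ∉ w) :
    (w ++ ['_']) <+: cs ↔ cs.take (n+1) = w ++ ['_'] := by
  constructor
  · rintro ⟨t, ht⟩
    have hlen : cs[w.length]? = some '_' := by rw [← ht]; simp
    have h1 : ¬ w.length < n := fun hlt => hmin _ hlt hlen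
    have h2 : ¬ n < w.length := by
      intro hlt
      have hcw : cs[n]? = w[n]? := by
        rw [← ht, List.append_assoc, List.getElem?_append_left hlt]
      rw [hn] at hcw
      exact hw (List.mem_of_getElem? hcw.symm)
    have hnw : n = w.length := by omega
    rw [← ht, hnw, List.take_append_of_le_length (by simp)]
    simp
  · intro h
    exact h ▸ List.take_prefix _ _

-- A prefix containing '_' cannot start a string with no '_'.
lemma pv_sw_false (name p : String) (h : '_' ∉ name.toList) (hp : '_' ∈ p.toList) :
    PySem.Str.startswith name p = false := by
  refine Bool.eq_false_iff.mpr fun hsw => ?_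
  rw [PySem.Str.startswith_eq, PySem.Chars.startswith_iff] at hsw
  exact h (hsw.subset hp)

-- startswith against w ++ "_" is equality of the first token ks with that prefix.
lemma pv_sw_key (name ks p : String) (w : List Char) (n : Nat)
    (hn : name.toList[n]? = some '_') (hmin : ∀ i < n, name.toList[i]? ≠ some '_')
    (hks : ks.toList = name.toList.take (n+1))
    (hp : p.toList = w ++ ['_']) (hw : '_' ∉ w) :
    PySem.Str.startswith name p = (ks == p) := by
  have h1 : PySem.Str.startswith name p = true ↔ ks = p := by
    rw [PySem.Str.startswith_eq, PySem.Chars.startswith_iff, hp,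
      pv_prefix_key_iff _ _ _ hn hmin hw, ← hks, ← hp]
    constructor
    · intro h; exact String.toList_inj.mp (by rw [h])
    · intro h; rw [h]
  rw [Bool.eq_iff_iff, h1, beq_iff_eq]

lemma pv_main (tool_name : String) : classify_tool tool_name = classify_tool_alt tool_name := by
  unfold classify_tool classify_tool_alt
  simp only []
  set name := PySem.Str.lower tool_name with hname
  by_cases hf : PySem.Str.find name "_" = -1
  · -- no '_' in the name: every prefix test fails on both sides
    have hno : '_' ∉ name.toList := by
      intro hm
      rw [PySem.Str.find_eq, (by decide : ("_" : String).toList = ['_']),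
        PySem.Chars.find_eq_neg_one_iff] at hf
      exact hf ((List.singleton_infix_iff _ _).mpr hm)
    simp only [hf, if_true, List.any_cons, List.any_nil, pvReadPrefixes,
      pv_sw_false name "calculate_" hno (by decide),
      pv_sw_false name "compute_" hno (by decide),
      pv_sw_false name "estimate_" hno (by decide),
      pv_sw_false name "get_" hno (by decide),
      pv_sw_false name "list_" hno (by decide),
      pv_sw_false name "fetch_" hno (by decide),
      pv_sw_false name "read_" hno (by decide),
      pv_sw_false name "search_" hno (by decide),
      pv_sw_false name "find_" hno (by decide),
      pv_sw_false name "query_" hno (by decide),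
      pv_sw_false name "check_" hno (by decide),
      pv_sw_false name "verify_" hno (by decide),
      pv_sw_false name "lookup_" hno (by decide),
      pv_sw_false name "describe_" hno (by decide),
      pv_sw_false name "show_" hno (by decide),
      pv_sw_false name "preview_" hno (by decide),
      pv_sw_false name "validate_" hno (by decide),
      pv_sw_false name "inspect_" hno (by decide),
      pv_sw_false name "count_" hno (by decide),
      pv_sw_false name "sum_" hno (by decide),
      pv_sw_false name "aggregate_" hno (by decide),
      pv_sw_false name "filter_" hno (by decide),
      pv_sw_false name "compare_" hno (by decide),
      Bool.false_or, if_false, ite_self, Bool.false_eq_true]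
  · -- the name has a '_' at first index n; both sides are determined by the first token ks
    have hfind : PySem.Str.find name "_" = PySem.Chars.find name.toList ("_" : String).toList :=
      PySem.Str.find_eq name "_"
    have h0 : 0 ≤ PySem.Str.find name "_" := by
      have := PySem.Chars.neg_one_le_find name.toList ("_" : String).toList
      omega
    have hsing : ∀ (l : List Char), ['_'] <+: l ↔ l.head? = some '_' := by
      intro l; cases l <;> simp [List.cons_prefix_iff]
    obtain ⟨hpre, hminp⟩ := PySem.Chars.find_spec (s := name.toList)
      (sub := ("_" : String).toList) (by omega)
    set n := (PySem.Chars.find name.toList ("_" : String).toList).toNat with hndef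
    have hn : name.toList[n]? = some '_' := by
      rw [← List.head?_drop]
      exact (hsing _).mp (by simpa using hpre)
    have hmin : ∀ i < n, name.toList[i]? ≠ some '_' := by
      intro i hi hcontra
      exact hminp i hi (by simpa [hsing, List.head?_drop] using hcontra)
    set ks := PySem.Str.slice name none (some (PySem.Str.find name "_" + 1)) with hksdef
    have hks : ks.toList = name.toList.take (n+1) := by
      rw [hksdef, PySem.Str.toList_slice, PySem.Chars.slice_eq_listSlice,
        PySem.List.slice_to name.toList (b := PySem.Str.find name "_" + 1) (by omega),
        (by omega : (PySem.Str.find name "_" + 1).toNat = n + 1)]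
    rw [if_neg hf]
    simp only [List.any_cons, List.any_nil, pvReadPrefixes,
      pv_sw_key name ks "calculate_" ['c','a','l','c','u','l','a','t','e'] n hn hmin hks (by decide) (by decide),
      pv_sw_key name ks "compute_" ['c','o','m','p','u','t','e'] n hn hmin hks (by decide) (by decide),
      pv_sw_key name ks "estimate_" ['e','s','t','i','m','a','t','e'] n hn hmin hks (by decide) (by decide),
      pv_sw_key name ks "get_" ['g','e','t'] n hn hmin hks (by decide) (by decide),
      pv_sw_key name ks "list_" ['l','i','s','t'] n hn hmin hks (by decide) (by decide),
      pv_sw_key name ks "fetch_" ['f','e','t','c','h'] n hn hmin hks (by decide) (by decide),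
      pv_sw_key name ks "read_" ['r','e','a','d'] n hn hmin hks (by decide) (by decide),
      pv_sw_key name ks "search_" ['s','e','a','r','c','h'] n hn hmin hks (by decide) (by decide),
      pv_sw_key name ks "find_" ['f','i','n','d'] n hn hmin hks (by decide) (by decide),
      pv_sw_key name ks "query_" ['q','u','e','r','y'] n hn hmin hks (by decide) (by decide),
      pv_sw_key name ks "check_" ['c','h','e','c','k'] n hn hmin hks (by decide) (by decide),
      pv_sw_key name ks "verify_" ['v','e','r','i','f','y'] n hn hmin hks (by decide) (by decide),
      pv_sw_key name ks "lookup_" ['l','o','o','k','u','p'] n hn hmin hks (by decide) (by decide),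
      pv_sw_key name ks "describe_" ['d','e','s','c','r','i','b','e'] n hn hmin hks (by decide) (by decide),
      pv_sw_key name ks "show_" ['s','h','o','w'] n hn hmin hks (by decide) (by decide),
      pv_sw_key name ks "preview_" ['p','r','e','v','i','e','w'] n hn hmin hks (by decide) (by decide),
      pv_sw_key name ks "validate_" ['v','a','l','i','d','a','t','e'] n hn hmin hks (by decide) (by decide),
      pv_sw_key name ks "inspect_" ['i','n','s','p','e','c','t'] n hn hmin hks (by decide) (by decide),
      pv_sw_key name ks "count_" ['c','o','u','n','t'] n hn hmin hks (by decide) (by decide),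
      pv_sw_key name ks "sum_" ['s','u','m'] n hn hmin hks (by decide) (by decide),
      pv_sw_key name ks "aggregate_" ['a','g','g','r','e','g','a','t','e'] n hn hmin hks (by decide) (by decide),
      pv_sw_key name ks "filter_" ['f','i','l','t','e','r'] n hn hmin hks (by decide) (by decide),
      pv_sw_key name ks "compare_" ['c','o','m','p','a','r','e'] n hn hmin hks (by decide) (by decide),
      Bool.or_false, ite_self]
    by_cases h0 : ks = "calculate_"
    · rw [h0]; decide
    by_cases h1 : ks = "compute_"
    · rw [h1]; decide
    by_cases h2 : ks = "estimate_"
    · rw [h2]; decide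
    by_cases h3 : ks = "get_"
    · rw [h3]; decide
    by_cases h4 : ks = "list_"
    · rw [h4]; decide
    by_cases h5 : ks = "fetch_"
    · rw [h5]; decide
    by_cases h6 : ks = "read_"
    · rw [h6]; decide
    by_cases h7 : ks = "search_"
    · rw [h7]; decide
    by_cases h8 : ks = "find_"
    · rw [h8]; decide
    by_cases h9 : ks = "query_"
    · rw [h9]; decide
    by_cases h10 : ks = "check_"
    · rw [h10]; decide
    by_cases h11 : ks = "verify_"
    · rw [h11]; decide
    by_cases h12 : ks = "lookup_"
    · rw [h12]; decide
    by_cases h13 : ks = "describe_"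
    · rw [h13]; decide
    by_cases h14 : ks = "show_"
    · rw [h14]; decide
    by_cases h15 : ks = "preview_"
    · rw [h15]; decide
    by_cases h16 : ks = "validate_"
    · rw [h16]; decide
    by_cases h17 : ks = "inspect_"
    · rw [h17]; decide
    by_cases h18 : ks = "count_"
    · rw [h18]; decide
    by_cases h19 : ks = "sum_"
    · rw [h19]; decide
    by_cases h20 : ks = "aggregate_"
    · rw [h20]; decide
    by_cases h21 : ks = "filter_"
    · rw [h21]; decide
    by_cases h22 : ks = "compare_"
    · rw [h22]; decide
    · -- first token matches no read/compute prefix: both sides default to "mutate"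
      have hitems : (PySem.Dict.empty.update
          [("calculate_", "compute"), ("compute_", "compute"), ("estimate_", "compute"), ("get_", "read"), ("list_", "read"), ("fetch_", "read"), ("read_", "read"), ("search_", "read"), ("find_", "read"), ("query_", "read"), ("check_", "read"), ("verify_", "read"), ("lookup_", "read"), ("describe_", "read"), ("show_", "read"), ("preview_", "read"), ("validate_", "read"), ("inspect_", "read"), ("count_", "read"), ("sum_", "read"), ("aggregate_", "read"), ("filter_", "read"), ("compare_", "read")]).items
          = [("calculate_", "compute"), ("compute_", "compute"), ("estimate_", "compute"), ("get_", "read"), ("list_", "read"), ("fetch_", "read"), ("read_", "read"), ("search_", "read"), ("find_", "read"), ("query_", "read"), ("check_", "read"), ("verify_", "read"), ("lookup_", "read"), ("describe_", "read"), ("show_", "read"), ("preview_", "read"), ("validate_", "read"), ("inspect_", "read"), ("count_", "read"), ("sum_", "read"), ("aggregate_", "read"), ("filter_", "read"), ("compare_", "read")] := by decide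
      have g0 : "calculate_" ≠ ks := fun h => h0 h.symm
      have g1 : "compute_" ≠ ks := fun h => h1 h.symm
      have g2 : "estimate_" ≠ ks := fun h => h2 h.symm
      have g3 : "get_" ≠ ks := fun h => h3 h.symm
      have g4 : "list_" ≠ ks := fun h => h4 h.symm
      have g5 : "fetch_" ≠ ks := fun h => h5 h.symm
      have g6 : "read_" ≠ ks := fun h => h6 h.symm
      have g7 : "search_" ≠ ks := fun h => h7 h.symm
      have g8 : "find_" ≠ ks := fun h => h8 h.symm
      have g9 : "query_" ≠ ks := fun h => h9 h.symm
      have g10 : "check_" ≠ ks := fun h => h10 h.symm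
      have g11 : "verify_" ≠ ks := fun h => h11 h.symm
      have g12 : "lookup_" ≠ ks := fun h => h12 h.symm
      have g13 : "describe_" ≠ ks := fun h => h13 h.symm
      have g14 : "show_" ≠ ks := fun h => h14 h.symm
      have g15 : "preview_" ≠ ks := fun h => h15 h.symm
      have g16 : "validate_" ≠ ks := fun h => h16 h.symm
      have g17 : "inspect_" ≠ ks := fun h => h17 h.symm
      have g18 : "count_" ≠ ks := fun h => h18 h.symm
      have g19 : "sum_" ≠ ks := fun h => h19 h.symm
      have g20 : "aggregate_" ≠ ks := fun h => h20 h.symm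
      have g21 : "filter_" ≠ ks := fun h => h21 h.symm
      have g22 : "compare_" ≠ ks := fun h => h22 h.symm
      simp [pvPrefixCategory, PySem.Dict.getD, PySem.Dict.ofList, PySem.Dict.get?,
        hitems, h0, h1, h2, h3, h4, h5, h6, h7, h8, h9, h10, h11, h12, h13, h14, h15, h16, h17, h18, h19, h20, h21, h22, g0, g1, g2, g3, g4, g5, g6, g7, g8, g9, g10, g11, g12, g13, g14, g15, g16, g17, g18, g19, g20, g21, g22]

-- ===== VERDICT (by name: the statement is the Claim_ definition above) =====
theorem classify_tool_spec : Claim_equal_classify_tool := by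
  intro tool_name _
  unfold Spec_classify_tool
  exact pv_main tool_name
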